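-- pv_equiv track=rewrite | github.com/aviswerdlow/k4 | experiments/pipeline_v4/scripts/v4.1/pareto_anchor_placement.py | find_repair_positions
-- ===== SOURCE A (Python) =====
-- from typing import List, Dict, Tuple, Optional
--
-- def find_repair_positions(text: str, anchor_positions: Dict) -> List[int]:
--     """
--     Find positions near anchors for repair.
--
--     Args:
--         text: Text with anchors
--         anchor_positions: Anchor configuration
--
--     Returns:
--         List of positions within ±2 tokens of anchors
--     """
--     repair_positions = set()
--     words = text.split()
--
--     # Map word positions to character positions
--     char_pos = 0
--     word_to_char = []
--     for word in words:
--         word_to_char.append(char_pos)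
--         char_pos += len(word) + 1  # +1 for space
--
--     # Find words near anchors
--     for anchor, pos in anchor_positions.items():
--         # Find word containing this position
--         for i, word_pos in enumerate(word_to_char):
--             if word_pos <= pos < word_pos + len(words[i]):
--                 # Add ±2 word positions
--                 for offset in range(-2, 3):
--                     if 0 <= i + offset < len(words):
--                         repair_positions.add(i + offset)
--                 break
--
--     return sorted(repair_positions)
-- ===== SOURCE B (Python) =====
-- from bisect import bisect_right
--
-- def find_repair_positions(text: str, anchor_positions) -> list:
--     """Locate the word containing each anchor by bisect_right binary search
--     on the sorted word->char-offset array, instead of a linear scan per anchor."""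
--     words = text.split()
--     offs = []
--     c = 0
--     for w in words:
--         offs.append(c)
--         c += len(w) + 1
--     hits = set()
--     for pos in anchor_positions.values():
--         i = bisect_right(offs, pos) - 1
--         if i >= 0 and pos < offs[i] + len(words[i]):
--             for off in range(-2, 3):
--                 if 0 <= i + off < len(words):
--                     hits.add(i + off)
--     return sorted(hits)
-- ===== Notes on version B (the rewrite author's own statement) =====
-- stated objective: alternative
-- what changed: Replaces the per-anchor linear scan over the word-offset array with a bisect_right binary search on the (sorted) offset array; the inner scan disappears.
import Mathlib
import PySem

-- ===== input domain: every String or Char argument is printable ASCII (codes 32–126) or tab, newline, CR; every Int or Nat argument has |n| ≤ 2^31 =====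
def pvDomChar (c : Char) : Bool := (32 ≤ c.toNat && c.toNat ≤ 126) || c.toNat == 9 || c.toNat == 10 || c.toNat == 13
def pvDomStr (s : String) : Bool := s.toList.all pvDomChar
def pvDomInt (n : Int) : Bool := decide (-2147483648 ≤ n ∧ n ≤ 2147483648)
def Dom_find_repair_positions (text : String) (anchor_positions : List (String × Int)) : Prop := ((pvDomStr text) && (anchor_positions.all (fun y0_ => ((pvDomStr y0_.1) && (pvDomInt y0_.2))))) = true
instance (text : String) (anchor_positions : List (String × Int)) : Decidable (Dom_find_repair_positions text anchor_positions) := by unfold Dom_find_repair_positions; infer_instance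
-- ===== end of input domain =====

-- B replaces A's per-anchor linear scan over the word-offset array with one
-- bisect_right binary search per anchor (the offsets are built sorted); same return value.

-- ===== PORT A =====
-- A's offset-building loop: 'word_to_char.append(char_pos); char_pos += len(word) + 1'
def pvW2C : List String → Int → List Int
  | [], _ => []
  | w :: ws, c => c :: pvW2C ws (c + PySem.Str.len w + 1)

-- 'for offset in range(-2, 3): if 0 <= i + offset < len(words): repair_positions.add(i + offset)'
def pvAddNear (s : PySem.Set Int) (i n : Int) : PySem.Set Int :=
  (PySem.List.pyRange (-2) 3 1).foldl
    (fun s o => if 0 ≤ i + o ∧ i + o < n then s.add (i + o) else s) s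

-- 'for i, word_pos in enumerate(word_to_char): if word_pos <= pos < word_pos + len(words[i]): …; break'
-- (i is the enumerate counter; words[i] is always in range, so getD is exact here)
def pvScanA (words : List String) (pos n : Int) : Nat → List Int → PySem.Set Int → PySem.Set Int
  | _, [], s => s
  | i, wp :: rest, s =>
    if wp ≤ pos ∧ pos < wp + PySem.Str.len (words.getD i "") then pvAddNear s (i : Int) n
    else pvScanA words pos n (i + 1) rest s

def find_repair_positions (text : String) (anchor_positions : List (String × Int)) : List Int :=
  let words := PySem.Str.split₀ text
  let word_to_char := pvW2C words 0
  let s := anchor_positions.foldl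
    (fun s p => pvScanA words p.2 (words.length : Int) 0 word_to_char s)
    (PySem.Set.empty)
  PySem.List.sorted s (fun x => x) false

-- ===== PORT B =====
def find_repair_positions_alt (text : String) (anchor_positions : List (String × Int)) : List Int :=
  let words := PySem.Str.split₀ text
  let offs := pvW2C words 0
  let s := anchor_positions.foldl
    (fun s p =>
      let i : Int := (PySem.List.bisectRight offs p.2 : Int) - 1
      if 0 ≤ i ∧ p.2 < offs.getD i.toNat 0 + PySem.Str.len (words.getD i.toNat "")
      then pvAddNear s i (words.length : Int) else s)
    (PySem.Set.empty)
  PySem.List.sorted s (fun x => x) false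

-- ===== PRECONDITION & SPEC =====
def Spec_find_repair_positions (text : String) (anchor_positions : List (String × Int)) (out : List Int) : Prop := out = find_repair_positions_alt text anchor_positions
instance (text : String) (anchor_positions : List (String × Int)) (out : List Int) : Decidable (Spec_find_repair_positions text anchor_positions out) := by unfold Spec_find_repair_positions; infer_instance

-- ===== CLAIM (what is proved, stated in full; the proofs are below) =====
def Claim_equal_find_repair_positions : Prop := ∀ (text : String) (anchor_positions : List (String × Int)), Dom_find_repair_positions text anchor_positions → Spec_find_repair_positions text anchor_positions (find_repair_positions text anchor_positions)

-- ===== LEMMAS AND PROOFS =====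

-- proof-only model of A's inner scan: index of the first word containing pos
def pvFM : List String → Int → Int → Option Nat
  | [], _, _ => none
  | w :: ws, c, pos =>
    if c ≤ pos ∧ pos < c + PySem.Str.len w then some 0
    else (pvFM ws (c + PySem.Str.len w + 1) pos).map (· + 1)

theorem pvW2C_length (ws : List String) (c : Int) : (pvW2C ws c).length = ws.length := by
  induction ws generalizing c with
  | nil => rfl
  | cons w ws ih => simp [pvW2C, ih]

theorem pvW2C_lb (ws : List String) (c : Int) : ∀ x ∈ pvW2C ws c, c ≤ x := by
  induction ws generalizing c with
  | nil => simp [pvW2C]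
  | cons w ws ih =>
    intro x hx
    simp only [pvW2C, List.mem_cons] at hx
    rcases hx with rfl | hx
    · exact le_refl x
    · have := ih (c + PySem.Str.len w + 1) x hx
      have hw : (0:Int) ≤ PySem.Str.len w := by simp [PySem.Str.len_eq]
      omega

theorem pvW2C_pairwise (ws : List String) (c : Int) : (pvW2C ws c).Pairwise (· ≤ ·) := by
  induction ws generalizing c with
  | nil => simp [pvW2C]
  | cons w ws ih =>
    refine List.Pairwise.cons ?_ (ih _)
    intro x hx
    have := pvW2C_lb ws (c + PySem.Str.len w + 1) x hx
    have hw : (0:Int) ≤ PySem.Str.len w := by simp [PySem.Str.len_eq]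
    omega

-- consecutive offsets differ by len(word) + 1
theorem pvW2C_succ (ws : List String) (c : Int) (j : Nat) (h : j + 1 < ws.length) :
    (pvW2C ws c)[j + 1]'(by simp [pvW2C_length]; omega) =
      (pvW2C ws c)[j]'(by simp [pvW2C_length]; omega) + PySem.Str.len (ws[j]'(by omega)) + 1 := by
  induction ws generalizing c j with
  | nil => simp at h
  | cons w ws ih =>
    cases j with
    | zero =>
      cases ws with
      | nil => simp at h
      | cons w' ws' => simp [pvW2C]
    | succ j =>
      simp only [pvW2C]
      have h' : j + 1 < ws.length := by simpa using h
      simpa using ih (c + PySem.Str.len w + 1) j h'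

theorem pvFM_none (ws : List String) (c pos : Int) (h : pvFM ws c pos = none) :
    ∀ (k : Nat) (hk : k < ws.length),
      ¬((pvW2C ws c)[k]'(by simp [pvW2C_length]; omega) ≤ pos ∧
        pos < (pvW2C ws c)[k]'(by simp [pvW2C_length]; omega) + PySem.Str.len (ws[k])) := by
  induction ws generalizing c with
  | nil => intro k hk; simp at hk
  | cons w ws ih =>
    intro k hk
    simp only [pvFM] at h
    split_ifs at h with hc
    simp only [Option.map_eq_none_iff] at h
    cases k with
    | zero =>
      simp only [pvW2C, List.getElem_cons_zero]
      simpa [PySem.Str.len_eq] using hc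
    | succ k =>
      have := ih _ h k (by simpa using hk)
      simpa [pvW2C, PySem.Str.len_eq] using this

theorem pvFM_some (ws : List String) (c pos : Int) (j : Nat) (h : pvFM ws c pos = some j) :
    ∃ hj : j < ws.length,
      (pvW2C ws c)[j]'(by simp [pvW2C_length]; omega) ≤ pos ∧
      pos < (pvW2C ws c)[j]'(by simp [pvW2C_length]; omega) + PySem.Str.len (ws[j]) := by
  induction ws generalizing c j with
  | nil => simp [pvFM] at h
  | cons w ws ih =>
    simp only [pvFM] at h
    split_ifs at h with hc
    · simp only [Option.some.injEq] at h
      subst h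
      exact ⟨by simp, by simpa [pvW2C] using hc⟩
    · cases hfm : pvFM ws (c + PySem.Str.len w + 1) pos with
      | none => rw [hfm] at h; simp at h
      | some j' =>
        rw [hfm] at h
        simp only [Option.map_some, Option.some.injEq] at h
        subst h
        obtain ⟨hj', h1, h2⟩ := ih (c + PySem.Str.len w + 1) j' hfm
        exact ⟨by simpa using Nat.succ_lt_succ hj', by simpa [pvW2C] using h1,
               by simpa [pvW2C] using h2⟩

-- A's inner loop computes pvFM and then inserts the ±2 range around the hit
theorem pvScanA_eq (words : List String) (pos n : Int) :
    ∀ (ws : List String) (i : Nat) (c : Int) (s : PySem.Set Int), words.drop i = ws →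
      pvScanA words pos n i (pvW2C ws c) s =
        match pvFM ws c pos with
        | none => s
        | some j => pvAddNear s ((i + j : Nat) : Int) n := by
  intro ws
  induction ws with
  | nil => intro i c s _; simp [pvW2C, pvScanA, pvFM]
  | cons w ws ih =>
    intro i c s hdrop
    have hgd : words.getD i "" = w := by
      have : words[i]? = some w := by
        rw [← List.head?_drop, hdrop]; rfl
      simp [List.getD_eq_getElem?_getD, this]
    simp only [pvW2C, pvScanA, hgd, pvFM]
    split_ifs with hc
    · simp
    · have hdrop' : words.drop (i + 1) = ws := by
        rw [← List.tail_drop, hdrop]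
        rfl
      rw [ih (i + 1) (c + PySem.Str.len w + 1) s hdrop']
      cases pvFM ws (c + PySem.Str.len w + 1) pos with
      | none => simp
      | some j =>
        simp only [Option.map_some]
        congr 2
        omega

-- per-anchor: A's linear scan = B's bisect-and-test
theorem perAnchor (words : List String) (pos : Int) (s : PySem.Set Int) :
    pvScanA words pos (words.length : Int) 0 (pvW2C words 0) s =
      (let i : Int := (PySem.List.bisectRight (pvW2C words 0) pos : Int) - 1
       if 0 ≤ i ∧ pos < (pvW2C words 0).getD i.toNat 0 + PySem.Str.len (words.getD i.toNat "")
       then pvAddNear s i (words.length : Int) else s) := by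
  have hlen := pvW2C_length words 0
  have hsorted := pvW2C_pairwise words 0
  obtain ⟨hble, hlt_le, hge_gt⟩ := PySem.List.bisectRight_spec (pvW2C words 0) pos hsorted
  set t := PySem.List.bisectRight (pvW2C words 0) pos with ht
  rw [pvScanA_eq words pos (words.length : Int) words 0 0 s (by simp)]
  cases hfm : pvFM words 0 pos with
  | none =>
    have hno := pvFM_none words 0 pos hfm
    simp only
    split_ifs with hcond
    · exfalso
      obtain ⟨hi0, hplt⟩ := hcond
      have ht1 : 1 ≤ t := by omega
      have htn : t - 1 < (pvW2C words 0).length := by omega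
      have htw : t - 1 < words.length := by omega
      have hle := hlt_le (t - 1) htn (by omega)
      have hgd1 : (pvW2C words 0).getD ((t : Int) - 1).toNat 0 =
          (pvW2C words 0)[t - 1]'htn := by
        have : ((t : Int) - 1).toNat = t - 1 := by omega
        rw [this, List.getD_eq_getElem _ _ htn]
      have hgd2 : words.getD ((t : Int) - 1).toNat "" = words[t - 1]'htw := by
        have : ((t : Int) - 1).toNat = t - 1 := by omega
        rw [this, List.getD_eq_getElem _ _ htw]
      rw [hgd1, hgd2] at hplt
      exact hno (t - 1) htw ⟨hle, hplt⟩
    · rfl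
  | some j =>
    obtain ⟨hj, hle, hlt⟩ := pvFM_some words 0 pos j hfm
    have hjo : j < (pvW2C words 0).length := by omega
    -- t = j + 1
    have htj : t = j + 1 := by
      by_contra hne
      rcases Nat.lt_or_ge t (j + 1) with hlt' | hge'
      · have := hge_gt j hjo (by omega)
        omega
      · have hj1 : j + 1 < t := by omega
        have hj1o : j + 1 < (pvW2C words 0).length := by omega
        have hle1 := hlt_le (j + 1) hj1o hj1
        have hsucc := pvW2C_succ words 0 j (by omega)
        omega
    simp only
    have hi0 : (0:Int) ≤ (t : Int) - 1 := by omega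
    have htoNat : ((t : Int) - 1).toNat = j := by omega
    have hgd1 : (pvW2C words 0).getD ((t : Int) - 1).toNat 0 = (pvW2C words 0)[j]'hjo := by
      rw [htoNat, List.getD_eq_getElem _ _ hjo]
    have hgd2 : words.getD ((t : Int) - 1).toNat "" = words[j]'hj := by
      rw [htoNat, List.getD_eq_getElem _ _ hj]
    rw [if_pos (by rw [hgd1, hgd2]; exact ⟨hi0, hlt⟩)]
    congr 1
    omega

-- ===== VERDICT (by name: the statement is the Claim_ definition above) =====
theorem find_repair_positions_spec : Claim_equal_find_repair_positions := by
  intro text anchor_positions _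
  unfold Spec_find_repair_positions find_repair_positions find_repair_positions_alt
  simp only
  congr 1
  exact List.foldl_ext _ _ _ fun s p _ => perAnchor (PySem.Str.split₀ text) p.2 s
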